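-- pv_equiv track=rewrite | github.com/riskikukuh/challange-hacker-rank | drawingBook.py | find
-- ===== SOURCE A (Python) =====
-- def find(n, p, isForward):
--     result = 0
--     i=0
--     for x in range(0 if isForward else n-1, -1 if not(isForward) else n, 2 if isForward else -2):
--         firstData = x
--         secondData = x + 1
--         if firstData == p or secondData == p:
--             result = i
--         i+=1
--     return result
-- ===== SOURCE B (Python) =====
-- def find(n, p, isForward):
--     # O(1) closed form: the pair containing p is (2k, 2k+1) from the front,
--     # (n-1-2i, n-2i) from the back; return its index, 0 if p is in no pair.
--     if isForward:
--         i = p // 2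
--         return i if 0 <= p and 2 * i < n else 0
--     else:
--         i = (n - p) // 2
--         return i if i >= 0 and n - 1 - 2 * i >= 0 else 0
-- ===== Notes on version B (the rewrite author's own statement) =====
-- stated objective: faster
-- what changed: Replaced A's loop over every page pair (tracking the index of the matching pair) by an O(1) closed-form formula: forward index p//2, backward index (n-p)//2, each guarded by a range check, returning 0 when p lies in no pair.
import Mathlib
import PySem

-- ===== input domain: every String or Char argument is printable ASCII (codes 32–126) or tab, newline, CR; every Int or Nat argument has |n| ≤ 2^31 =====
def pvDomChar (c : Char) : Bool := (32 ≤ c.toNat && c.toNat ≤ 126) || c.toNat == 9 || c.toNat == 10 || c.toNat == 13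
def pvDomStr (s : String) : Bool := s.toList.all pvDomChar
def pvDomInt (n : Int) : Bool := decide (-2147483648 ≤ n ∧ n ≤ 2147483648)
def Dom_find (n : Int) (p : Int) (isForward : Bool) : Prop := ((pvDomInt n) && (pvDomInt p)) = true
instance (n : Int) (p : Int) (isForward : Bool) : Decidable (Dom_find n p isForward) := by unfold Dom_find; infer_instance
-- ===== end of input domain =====

-- B replaces A's O(n) scan over all page pairs by an O(1) closed-form index formula.

-- ===== PORT A =====
def find (n : Int) (p : Int) (isForward : Bool) : Int :=
  let result : Int := 0
  let i : Int := 0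
  let st := (PySem.List.pyRange (if isForward then 0 else n - 1)
      (if !isForward then -1 else n) (if isForward then 2 else -2)).foldl
    (fun (st : Int × Int) x =>
      let firstData := x
      let secondData := x + 1
      (if firstData = p ∨ secondData = p then st.2 else st.1, st.2 + 1))
    (result, i)
  st.1

-- ===== PORT B =====
def find_alt (n : Int) (p : Int) (isForward : Bool) : Int :=
  if isForward then
    let i := PySem.Int.floordiv p 2
    if 0 ≤ p ∧ 2 * i < n then i else 0
  else
    let i := PySem.Int.floordiv (n - p) 2
    if 0 ≤ i ∧ 0 ≤ n - 1 - 2 * i then i else 0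

-- ===== PRECONDITION & SPEC =====
def Spec_find (n : Int) (p : Int) (isForward : Bool) (out : Int) : Prop := out = find_alt n p isForward
instance (n : Int) (p : Int) (isForward : Bool) (out : Int) : Decidable (Spec_find n p isForward out) := by unfold Spec_find; infer_instance

-- ===== CLAIM (what is proved, stated in full; the proofs are below) =====
def Claim_equal_find : Prop := ∀ (n : Int) (p : Int) (isForward : Bool), Dom_find n p isForward → Spec_find n p isForward (find n p isForward)

-- ===== LEMMAS AND PROOFS =====

-- A's loop over the forward page pairs (2k, 2k+1), characterised in closed form.
lemma pv_fold_fwd (p : Int) (m : Nat) (r0 i0 : Int) :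
    ((List.range m).map (fun (k : Nat) => (0 : Int) + 2 * (k : Int))).foldl
      (fun (st : Int × Int) x =>
        let firstData := x
        let secondData := x + 1
        (if firstData = p ∨ secondData = p then st.2 else st.1, st.2 + 1))
      (r0, i0)
    = ((if 0 ≤ p ∧ p < 2 * (m : Int) then i0 + p / 2 else r0), i0 + m) := by
  induction m with
  | zero => simp
  | succ m ih =>
    rw [List.range_succ, List.map_append, List.foldl_append, ih]
    simp only [List.map_cons, List.map_nil, List.foldl_cons, List.foldl_nil]
    split_ifs with h1 h2 h3 h2 h3 <;> rw [Prod.mk.injEq] <;> push_cast at * <;> constructor <;> omega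

-- A's loop over the backward page pairs (n-1-2k, n-2k), characterised in closed form.
lemma pv_fold_bwd (n p : Int) (m : Nat) (r0 i0 : Int) :
    ((List.range m).map (fun (k : Nat) => n - 1 + -2 * (k : Int))).foldl
      (fun (st : Int × Int) x =>
        let firstData := x
        let secondData := x + 1
        (if firstData = p ∨ secondData = p then st.2 else st.1, st.2 + 1))
      (r0, i0)
    = ((if n - 2 * (m : Int) < p ∧ p ≤ n then i0 + (n - p) / 2 else r0), i0 + m) := by
  induction m with
  | zero => simp
  | succ m ih =>
    rw [List.range_succ, List.map_append, List.foldl_append, ih]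
    simp only [List.map_cons, List.map_nil, List.foldl_cons, List.foldl_nil]
    split_ifs with h1 h2 h3 h2 h3 <;> rw [Prod.mk.injEq] <;> push_cast at * <;> constructor <;> omega

-- ===== VERDICT (by name: the statement is the Claim_ definition above) =====
theorem find_spec : Claim_equal_find := by
  intro n p isForward _
  unfold Spec_find find find_alt
  cases isForward with
  | true =>
    norm_num
    rw [PySem.List.pyRange_of_pos 0 n (s := 2) (by norm_num), pv_fold_fwd]
    dsimp only
    split_ifs with h1 h2 h2 <;> push_cast at * <;> omega
  | false =>
    norm_num
    rw [PySem.List.pyRange_of_neg (n - 1) (-1) (s := -2) (by norm_num), pv_fold_bwd]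
    dsimp only
    split_ifs with h1 h2 h2 <;> push_cast at * <;> omega
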